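-- pv_equiv track=rewrite | github.com/zzx060827/dsa2025 | openjudge/6947/2400012128.py | defs_ordinary_tree
-- ===== SOURCE A (Python) =====
-- def defs_ordinary_tree(arr):
--     count = 0
--     ans = 0
--     for i in arr:
--         if i == "d":
--             count += 1
--             ans = max(ans,count)
--         else:
--             count -= 1
--     return ans
-- ===== SOURCE B (Python) =====
-- def defs_ordinary_tree(arr):
--     # Backwards recurrence: best nesting depth achievable from the suffix,
--     # via maxdepth(x:rest) = max(0, step(x) + maxdepth(rest)), computed
--     # right-to-left with a 0-clamp instead of a counter plus running max.
--     best = 0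
--     for x in reversed(arr):
--         best = max(0, (1 if x == "d" else -1) + best)
--     return best
-- ===== Notes on version B (the rewrite author's own statement) =====
-- stated objective: alternative
-- what changed: Replaces the forward counter-plus-running-max loop with a right-to-left sweep computing the suffix recurrence maxdepth(x:rest) = max(0, step(x) + maxdepth(rest)) with a single 0-clamped accumulator.
import Mathlib
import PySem

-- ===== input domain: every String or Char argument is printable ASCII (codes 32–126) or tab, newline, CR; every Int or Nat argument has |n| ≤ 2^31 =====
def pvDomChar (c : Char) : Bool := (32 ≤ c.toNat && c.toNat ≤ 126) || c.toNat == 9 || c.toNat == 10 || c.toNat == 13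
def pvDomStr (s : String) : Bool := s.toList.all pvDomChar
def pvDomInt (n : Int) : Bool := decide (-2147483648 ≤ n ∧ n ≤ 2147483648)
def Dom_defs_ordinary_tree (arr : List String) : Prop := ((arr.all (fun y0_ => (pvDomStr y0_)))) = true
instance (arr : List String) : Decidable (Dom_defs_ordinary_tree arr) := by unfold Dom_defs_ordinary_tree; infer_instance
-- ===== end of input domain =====

-- B replaces A's counter+max loop with a right-to-left clamped sweep of the suffix recurrence: an alternative decomposition of the same cost.


-- ===== PORT A =====
-- A: one pass with a counter and a running max.
def defs_ordinary_tree (arr : List String) : Int :=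
  (arr.foldl (fun (s : Int × Int) i =>
    if i = "d" then (s.1 + 1, max s.2 (s.1 + 1)) else (s.1 - 1, s.2)) (0, 0)).2

-- ===== PORT B =====
-- B: right-to-left sweep of the suffix recurrence with a 0-clamped accumulator.
def defs_ordinary_tree_alt (arr : List String) : Int :=
  arr.reverse.foldl (fun best x => max 0 ((if x = "d" then (1 : Int) else -1) + best)) 0

-- ===== PRECONDITION & SPEC =====
def Spec_defs_ordinary_tree (arr : List String) (out : Int) : Prop := out = defs_ordinary_tree_alt arr
instance (arr : List String) (out : Int) : Decidable (Spec_defs_ordinary_tree arr out) := by unfold Spec_defs_ordinary_tree; infer_instance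

-- ===== CLAIM (what is proved, stated in full; the proofs are below) =====
def Claim_equal_defs_ordinary_tree : Prop := ∀ (arr : List String), Dom_defs_ordinary_tree arr → Spec_defs_ordinary_tree arr (defs_ordinary_tree arr)

-- ===== LEMMAS AND PROOFS =====

-- the suffix recurrence B's right-to-left sweep computes, in structural form
def altRec : List String → Int
  | [] => 0
  | x :: rest => max 0 ((if x = "d" then (1 : Int) else -1) + altRec rest)

theorem alt_eq_altRec (arr : List String) : defs_ordinary_tree_alt arr = altRec arr := by
  unfold defs_ordinary_tree_alt
  rw [List.foldl_reverse]
  induction arr with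
  | nil => rfl
  | cons x rest ih => simp [List.foldr, altRec, ih]

theorem altRec_nonneg (arr : List String) : 0 <= altRec arr := by
  cases arr <;> simp [altRec]

theorem loop_invariant (arr : List String) (c a : Int) (h : c <= a) :
    (arr.foldl (fun (s : Int × Int) i =>
      if i = "d" then (s.1 + 1, max s.2 (s.1 + 1)) else (s.1 - 1, s.2)) (c, a)).2
      = max a (c + altRec arr) := by
  induction arr generalizing c a with
  | nil => simp [altRec]; omega
  | cons x rest ih =>
    have hr := altRec_nonneg rest
    by_cases hx : x = "d" <;>
      simp only [List.foldl_cons, hx, if_true, if_false, altRec,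
        ih (c + 1) (max a (c + 1)) (by omega), ih (c - 1) a (by omega)] <;> omega

-- ===== VERDICT (by name: the statement is the Claim_ definition above) =====
theorem defs_ordinary_tree_spec : Claim_equal_defs_ordinary_tree := by
  intro arr _
  unfold Spec_defs_ordinary_tree defs_ordinary_tree
  rw [loop_invariant arr 0 0 le_rfl, alt_eq_altRec]
  have := altRec_nonneg arr
  omega
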